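-- pv_equiv track=rewrite | github.com/Defense-Hub/Algorithm-Study | 24.09.13/정은지_340212.py | solution
-- ===== SOURCE A (Python) =====
-- def solution(diffs, times, limit):
--     answer = 1
--     left = 1
--     right = max(diffs)
--
--     while left <= right:
--         mid = (left + right) // 2
--         # 조건에 맞으면 더 작은 level값이 있는지 탐색
--         if puzzle(mid,diffs,times,limit):
--             right = mid - 1
--             answer = mid
--         # 조건에 맞지 않으면 level의 값 늘리기
--         else:
--             left = mid + 1
--     return answer
--
-- def puzzle(level,diffs,times,limit):
--     n = len(diffs)
--     total_time = 0
--     time_cur = 0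
--     time_prev = 0
--
--     for i in range(n):
--         time_cur = times[i]
--         # 1. diff > level이면 (diff-level)*(time_cur+time_prev)+time_cur
--         if diffs[i] > level:
--             total_time += (diffs[i]-level)*(time_cur+time_prev)+time_cur
--         # 2. diff <= level이면 time_cur만큼의 시간만 사용
--         else:
--             total_time += time_cur
--         time_prev = times[i]
--
--     return total_time <= limit
-- ===== SOURCE B (Python) =====
-- def solution(diffs, times, limit):
--     # Sort (diff, weight) pairs once and build suffix sums, so each probe of the
--     # binary search on the level is answered by a bisect instead of a rescan.
--     n = len(diffs)
--     base = sum(times[:n])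
--     pairs = sorted(
--         [(diffs[i], times[i] + (times[i - 1] if i else 0)) for i in range(n)],
--         key=lambda p: p[0],
--     )
--     ds = [p[0] for p in pairs]
--     sdw = [0] * (n + 1)  # sdw[k] = sum of d*w over pairs[k:]
--     sw = [0] * (n + 1)   # sw[k]  = sum of w   over pairs[k:]
--     for i in range(n - 1, -1, -1):
--         sdw[i] = sdw[i + 1] + pairs[i][0] * pairs[i][1]
--         sw[i] = sw[i + 1] + pairs[i][1]
--
--     def ok(level):
--         # hand-rolled bisect_right on ds (no imports available)
--         lo, hi = 0, n
--         while lo < hi: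
--             mid = (lo + hi) // 2
--             if ds[mid] <= level:
--                 lo = mid + 1
--             else:
--                 hi = mid
--         return base + sdw[lo] - level * sw[lo] <= limit
--
--     answer = 1
--     left, right = 1, max(diffs)
--     while left <= right:
--         mid = (left + right) // 2
--         if ok(mid):
--             right = mid - 1
--             answer = mid
--         else:
--             left = mid + 1
--     return answer
-- ===== Notes on version B (the rewrite author's own statement) =====
-- stated objective: alternative
-- what changed: B sorts the (diff, weight) pairs once, builds suffix sums of diff*weight and weight, and answers each feasibility probe of the outer binary search with a bisect on the sorted diffs instead of A's rescan of all puzzles.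
-- outside the precondition, e.g. on solution([-3], [], 0): A returns 1, B raises IndexError
import Mathlib
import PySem

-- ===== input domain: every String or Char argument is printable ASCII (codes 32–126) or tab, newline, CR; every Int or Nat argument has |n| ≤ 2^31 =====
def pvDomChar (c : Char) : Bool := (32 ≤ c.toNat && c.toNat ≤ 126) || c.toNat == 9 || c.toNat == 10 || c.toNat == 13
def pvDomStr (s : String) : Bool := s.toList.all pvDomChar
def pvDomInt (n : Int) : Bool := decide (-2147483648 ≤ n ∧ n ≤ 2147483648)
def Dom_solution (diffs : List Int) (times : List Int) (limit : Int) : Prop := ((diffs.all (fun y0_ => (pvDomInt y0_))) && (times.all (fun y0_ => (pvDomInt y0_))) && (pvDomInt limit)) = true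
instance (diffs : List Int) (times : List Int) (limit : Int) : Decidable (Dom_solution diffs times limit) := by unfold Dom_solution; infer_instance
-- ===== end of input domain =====

-- B re-implements the feasibility check on sorted (diff, weight) pairs with suffix sums and a
-- bisection lookup, so each probe of the outer binary search avoids rescanning all puzzles
-- (objective: alternative). Both Pythons share the identical outer `while left <= right` loop,
-- ported once as pvSearch and used by both ports.

-- ===== PORT A =====
-- the outer binary-search while-loop, identical line for line in Source A and Source B (shared helper)
def pvSearch (check : Int → Bool) (left right answer : Int) : Int :=
  if h : left ≤ right then
    let mid := PySem.Int.floordiv (left + right) 2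
    if check mid then pvSearch check left (mid - 1) mid
    else pvSearch check (mid + 1) right answer
  else answer
termination_by (right + 1 - left).toNat
decreasing_by
  · have hb := PySem.Int.floordiv_two_mid_bounds (lo := left) (hi := right) h
    omega
  · have hb := PySem.Int.floordiv_two_mid_bounds (lo := left) (hi := right) h
    omega

-- Source A's helper `puzzle`: indexed for-loop carrying (total_time, time_prev)
def pvPuzzle (level : Int) (diffs times : List Int) (limit : Int) : Bool :=
  let n := diffs.length
  let st := (PySem.List.pyRange 0 (n : Int) 1).foldl (fun (st : Int × Int) i =>
      let tc := PySem.List.pyGetD times i 0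
      let d := PySem.List.pyGetD diffs i 0
      (if level < d then st.1 + (d - level) * (tc + st.2) + tc else st.1 + tc, tc))
    (0, 0)
  decide (st.1 ≤ limit)

def solution (diffs : List Int) (times : List Int) (limit : Int) : Int :=
  pvSearch (fun mid => pvPuzzle mid diffs times limit) 1
    ((PySem.List.max? diffs (fun y => y)).getD 0) 1

-- ===== PORT B =====
-- Source B: the (diff, weight) pair list, weight = times[i] + (times[i-1] if i else 0)
def pvPairs (diffs times : List Int) : List (Int × Int) :=
  (PySem.List.pyRange 0 (diffs.length : Int) 1).map (fun i =>
    (PySem.List.pyGetD diffs i 0,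
     PySem.List.pyGetD times i 0 + (if i = 0 then 0 else PySem.List.pyGetD times (i - 1) 0)))

-- Source B's backward loop `for i in range(n-1, -1, -1): s[i] = s[i+1] + f(pairs[i])`
def pvSuffix (f : Int × Int → Int) : List (Int × Int) → List Int
  | [] => [0]
  | p :: ps =>
    let t := pvSuffix f ps
    (f p + t.headD 0) :: t

-- Source B's hand-rolled bisect_right while-loop
def pvBisect (ds : List Int) (level : Int) (lo hi : Int) : Int :=
  if h : lo < hi then
    let mid := PySem.Int.floordiv (lo + hi) 2
    if PySem.List.pyGetD ds mid 0 ≤ level then pvBisect ds level (mid + 1) hi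
    else pvBisect ds level lo mid
  else lo
termination_by (hi - lo).toNat
decreasing_by
  · have hb := PySem.Int.floordiv_two_mid_bounds (lo := lo) (hi := hi) (le_of_lt h)
    have hlt : PySem.Int.floordiv (lo + hi) 2 < hi :=
      (PySem.Int.floordiv_lt_iff_lt_mul (by omega)).mpr (by omega)
    omega
  · have hb := PySem.Int.floordiv_two_mid_bounds (lo := lo) (hi := hi) (le_of_lt h)
    have hlt : PySem.Int.floordiv (lo + hi) 2 < hi :=
      (PySem.Int.floordiv_lt_iff_lt_mul (by omega)).mpr (by omega)
    omega

-- Source B's `ok(level)`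
def pvOk (base : Int) (ds sdw sw : List Int) (limit n level : Int) : Bool :=
  let lo := pvBisect ds level 0 n
  decide (base + PySem.List.pyGetD sdw lo 0 - level * PySem.List.pyGetD sw lo 0 ≤ limit)

def solution_alt (diffs : List Int) (times : List Int) (limit : Int) : Int :=
  let n := diffs.length
  let base := (PySem.List.slice times none (some (n : Int))).sum
  let pairs := PySem.List.sorted (pvPairs diffs times) (fun p => p.1) false
  let ds := pairs.map (fun p => p.1)
  let sdw := pvSuffix (fun p => p.1 * p.2) pairs
  let sw := pvSuffix (fun p => p.2) pairs
  pvSearch (fun mid => pvOk base ds sdw sw limit (n : Int) mid) 1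
    ((PySem.List.max? diffs (fun y => y)).getD 0) 1

-- ===== PRECONDITION & SPEC =====
-- Pre_ excludes empty diffs (A's max([]) raises) and times shorter than diffs: there A raises
-- IndexError on every probed level, except when max(diffs) < 1, where A skips the check loop
-- entirely and returns 1 without ever indexing times while B builds its pair list eagerly and raises.
def Pre_solution (diffs : List Int) (times : List Int) (limit : Int) : Prop :=
  diffs ≠ [] ∧ diffs.length ≤ times.length
instance (diffs : List Int) (times : List Int) (limit : Int) : Decidable (Pre_solution diffs times limit) := by unfold Pre_solution; infer_instance

def pvWitness_solution : List Int × List Int × Int := ([2, 5, 3], [1, 2, 2], 10)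

def Spec_solution (diffs : List Int) (times : List Int) (limit : Int) (out : Int) : Prop := out = solution_alt diffs times limit
instance (diffs : List Int) (times : List Int) (limit : Int) (out : Int) : Decidable (Spec_solution diffs times limit out) := by unfold Spec_solution; infer_instance

-- ===== CLAIM (what is proved, stated in full; the proofs are below) =====
def Claim_equal_solution : Prop := ∀ (diffs : List Int) (times : List Int) (limit : Int), Dom_solution diffs times limit → Pre_solution diffs times limit → Spec_solution diffs times limit (solution diffs times limit)

-- ===== LEMMAS AND PROOFS =====

theorem pvPairs_eq (diffs times : List Int) :
    pvPairs diffs times = (List.range diffs.length).map (fun i =>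
      (diffs.getD i 0, times.getD i 0 + (if i = 0 then 0 else times.getD (i - 1) 0))) := by
  unfold pvPairs
  rw [PySem.List.pyRange_zero_nat, List.map_map]
  refine List.map_congr_left fun i hi => ?_
  simp only [Function.comp]
  have h0 : ((i : Int) = 0) = (i = 0) := by simp [Int.natCast_eq_zero]
  rcases Nat.eq_zero_or_pos i with h | h
  · subst h; simp [PySem.List.pyGetD_zero]
  · have : ((i : Int) - 1) = ((i - 1 : Nat) : Int) := by omega
    simp [this, PySem.List.pyGetD_natCast, Int.natCast_eq_zero, Nat.pos_iff_ne_zero.mp h]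


theorem puzzle_fold (level : Int) (diffs times : List Int)
    (hlen : diffs.length ≤ times.length) :
    ∀ m, m ≤ diffs.length →
    (List.range m).foldl (fun (st : Int × Int) (i : Nat) =>
      let tc := times.getD i 0
      let d := diffs.getD i 0
      (if level < d then st.1 + (d - level) * (tc + st.2) + tc else st.1 + tc, tc)) (0, 0)
    = ((times.take m).sum
        + (((List.range m).map (fun i =>
            (diffs.getD i 0, times.getD i 0 + (if i = 0 then 0 else times.getD (i - 1) 0)))).map
           (fun p => if level < p.1 then (p.1 - level) * p.2 else 0)).sum,
       if m = 0 then 0 else times.getD (m - 1) 0) := by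
  intro m
  induction m with
  | zero => intro _; simp
  | succ m ih =>
    intro hm
    have hm' : m ≤ diffs.length := by omega
    have hmt : m < times.length := by omega
    rw [List.range_succ, List.foldl_append, List.map_append, List.map_append, ih hm']
    have hgd : times.getD m 0 = times[m] := by
      simp [List.getD_eq_getElem?_getD, List.getElem?_eq_getElem hmt]
    have htake : (times.take (m + 1)).sum = (times.take m).sum + times.getD m 0 := by
      rw [List.take_add_one, List.getElem?_eq_getElem hmt,
        Option.toList_some, List.sum_append, List.sum_cons, List.sum_nil, hgd, add_zero]
    simp only [List.foldl_cons, List.foldl_nil, List.map_cons, List.map_nil, List.sum_append,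
      List.sum_cons, List.sum_nil, htake]
    rcases Nat.eq_zero_or_pos m with h0 | h0
    · subst h0
      split <;> simp [Prod.mk.injEq] <;> ring
    · have hne : m ≠ 0 := by omega
      split <;> simp [Prod.mk.injEq, hne] <;> ring


theorem pvBisect_spec (ds : List Int) (level : Int)
    (hmono : ∀ p q : Nat, p ≤ q → q < ds.length → ds.getD p 0 ≤ ds.getD q 0) :
    ∀ lo hi : Int, 0 ≤ lo → lo ≤ hi → hi ≤ (ds.length : Int) →
    (∀ j : Nat, (j : Int) < lo → ds.getD j 0 ≤ level) →
    (∀ j : Nat, hi ≤ (j : Int) → j < ds.length → level < ds.getD j 0) →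
    0 ≤ pvBisect ds level lo hi ∧ pvBisect ds level lo hi ≤ (ds.length : Int) ∧
    (∀ j : Nat, (j : Int) < pvBisect ds level lo hi → ds.getD j 0 ≤ level) ∧
    (∀ j : Nat, pvBisect ds level lo hi ≤ (j : Int) → j < ds.length → level < ds.getD j 0) := by
  intro lo hi
  induction lo, hi using pvBisect.induct ds level with
  | case1 lo hi h mid hle ih =>
    intro h0 hlh hhn hbelow habove
    have hb := PySem.Int.floordiv_two_mid_bounds (lo := lo) (hi := hi) (le_of_lt h)
    have hltm : mid < hi := (PySem.Int.floordiv_lt_iff_lt_mul (by omega)).mpr (by omega)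
    rw [pvBisect]
    have hmideq : PySem.Int.floordiv (lo + hi) 2 = mid := rfl
    simp only [dif_pos h, hmideq, if_pos hle]
    refine ih (by omega) (by omega) hhn ?_ habove
    intro j hj
    have hjm : j ≤ mid.toNat := by omega
    have hmn : mid.toNat < ds.length := by omega
    have := hmono j mid.toNat hjm hmn
    have hmid : PySem.List.pyGetD ds mid 0 = ds.getD mid.toNat 0 := by
      rw [show mid = ((mid.toNat : Nat) : Int) by omega, PySem.List.pyGetD_natCast]
      rw [show ((mid.toNat : Nat) : Int).toNat = mid.toNat from Int.toNat_natCast _]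
    rw [hmid] at hle
    omega
  | case2 lo hi h mid hgt ih =>
    intro h0 hlh hhn hbelow habove
    have hb := PySem.Int.floordiv_two_mid_bounds (lo := lo) (hi := hi) (le_of_lt h)
    have hltm : mid < hi := (PySem.Int.floordiv_lt_iff_lt_mul (by omega)).mpr (by omega)
    rw [pvBisect]
    have hmideq : PySem.Int.floordiv (lo + hi) 2 = mid := rfl
    simp only [dif_pos h, hmideq, if_neg hgt]
    refine ih h0 (by omega) (by omega) hbelow ?_
    intro j hj hjn
    have hmn : mid.toNat < ds.length := by omega
    have hmid : PySem.List.pyGetD ds mid 0 = ds.getD mid.toNat 0 := by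
      rw [show mid = ((mid.toNat : Nat) : Int) by omega, PySem.List.pyGetD_natCast]
      rw [show ((mid.toNat : Nat) : Int).toNat = mid.toNat from Int.toNat_natCast _]
    rw [hmid] at hgt
    have := hmono mid.toNat j (by omega) hjn
    omega
  | case3 lo hi h =>
    intro h0 hlh hhn hbelow habove
    rw [pvBisect]
    simp only [dif_neg h]
    exact ⟨h0, by omega, fun j hj => hbelow j hj, fun j hj hjn => habove j (by omega) hjn⟩


theorem pvSuffix_getD (f : Int × Int → Int) :
    ∀ (ps : List (Int × Int)) (k : Nat), k ≤ ps.length →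
    (pvSuffix f ps).getD k 0 = ((ps.drop k).map f).sum := by
  intro ps
  induction ps with
  | nil => intro k hk; simp at hk; subst hk; simp [pvSuffix]
  | cons p ps ih =>
    intro k hk
    cases k with
    | zero =>
      have hh : (pvSuffix f ps).head?.getD 0 = ((ps.map f)).sum := by
        have := ih 0 (by omega)
        cases hps : pvSuffix f ps with
        | nil => simp [hps] at this ⊢; simpa using this
        | cons a t => simp [hps] at this ⊢; simpa using this
      simp [pvSuffix, hh]
    | succ k =>
      simp only [pvSuffix, List.getD_cons_succ, List.drop_succ_cons]
      exact ih k (by simpa using hk)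


theorem sum_ite_split (level : Int) (ps : List (Int × Int)) (k : Nat) (hk : k ≤ ps.length)
    (hlow : ∀ j (hj : j < ps.length), j < k → (ps[j]).1 ≤ level)
    (hhigh : ∀ j (hj : j < ps.length), k ≤ j → level < (ps[j]).1) :
    (ps.map (fun p => if level < p.1 then (p.1 - level) * p.2 else 0)).sum
    = ((ps.drop k).map (fun p => p.1 * p.2)).sum - level * ((ps.drop k).map (fun p => p.2)).sum := by
  conv_lhs => rw [← List.take_append_drop k ps]
  rw [List.map_append, List.sum_append]
  have h1 : ((ps.take k).map (fun p => if level < p.1 then (p.1 - level) * p.2 else 0)).sum = 0 := by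
    apply List.sum_eq_zero
    intro x hx
    obtain ⟨p, hp, hpx⟩ := List.mem_map.mp hx
    obtain ⟨j, hj, hpj⟩ := List.mem_iff_getElem.mp hp
    have hjk : j < k := by
      have := List.length_take (l := ps) (i := k); omega
    have hjl : j < ps.length := by omega
    have : p = ps[j] := by rw [← hpj, List.getElem_take]
    subst this
    rw [← hpx, if_neg (by exact not_lt.mpr (hlow j hjl hjk))]
  have h2 : ((ps.drop k).map (fun p => if level < p.1 then (p.1 - level) * p.2 else 0)).sum
      = ((ps.drop k).map (fun p => (p.1 - level) * p.2)).sum := by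
    congr 1
    apply List.map_congr_left
    intro p hp
    obtain ⟨j, hj, hpj⟩ := List.mem_iff_getElem.mp hp
    have hlen : (ps.drop k).length = ps.length - k := List.length_drop
    have : p = ps[k + j]'(by omega) := by rw [← hpj, List.getElem_drop]
    subst this
    rw [if_pos (hhigh (k + j) (by omega) (by omega))]
  rw [h1, h2, zero_add]
  induction (ps.drop k) with
  | nil => simp
  | cons p t iht => simp only [List.map_cons, List.sum_cons, iht]; ring


theorem puzzle_eq (level : Int) (diffs times : List Int) (limit : Int)
    (hlen : diffs.length ≤ times.length) :
    pvPuzzle level diffs times limit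
    = decide ((times.take diffs.length).sum
        + ((pvPairs diffs times).map (fun p => if level < p.1 then (p.1 - level) * p.2 else 0)).sum
        ≤ limit) := by
  dsimp only [pvPuzzle]
  rw [PySem.List.pyRange_zero_nat, List.foldl_map]
  simp only [PySem.List.pyGetD_natCast]
  rw [puzzle_fold level diffs times hlen diffs.length le_rfl, pvPairs_eq, List.map_map]


theorem checks_eq (diffs times : List Int) (limit : Int)
    (hlen : diffs.length ≤ times.length) (level : Int) :
    pvOk ((PySem.List.slice times none (some (diffs.length : Int))).sum)
      ((PySem.List.sorted (pvPairs diffs times) (fun p => p.1) false).map (fun p => p.1))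
      (pvSuffix (fun p => p.1 * p.2) (PySem.List.sorted (pvPairs diffs times) (fun p => p.1) false))
      (pvSuffix (fun p => p.2) (PySem.List.sorted (pvPairs diffs times) (fun p => p.1) false))
      limit (diffs.length : Int) level
    = pvPuzzle level diffs times limit := by
  set ps := PySem.List.sorted (pvPairs diffs times) (fun p => p.1) false with hps
  set ds := ps.map (fun p => p.1) with hds
  have hplen : (pvPairs diffs times).length = diffs.length := by
    rw [pvPairs_eq]; simp
  have hslen : ps.length = diffs.length := by
    rw [hps, (PySem.List.sorted_perm _ _ _).length_eq, hplen]
  have hdlen : ds.length = diffs.length := by rw [hds, List.length_map, hslen]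
  have hmono : ∀ p q : Nat, p ≤ q → q < ds.length → ds.getD p 0 ≤ ds.getD q 0 := by
    intro p q hpq hq
    have hp : p < ds.length := by omega
    have hq' : q < ps.length := by rw [hds, List.length_map] at hq; exact hq
    rw [List.getD_eq_getElem?_getD, List.getD_eq_getElem?_getD,
      List.getElem?_eq_getElem hp, List.getElem?_eq_getElem hq]
    simp only [hds, List.getElem_map, Option.getD_some]
    exact PySem.List.key_sorted_getElem_mono (pvPairs diffs times) (fun p => p.1) hpq hq'
  obtain ⟨hr0, hrn, hlowD, hhighD⟩ :=
    pvBisect_spec ds level hmono 0 (diffs.length : Int) le_rfl (by omega) (by omega)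
      (fun j hj => absurd hj (by omega))
      (fun j hj hjn => absurd hjn (by omega))
  set r := pvBisect ds level 0 (diffs.length : Int) with hr
  have hrk : r = ((r.toNat : Nat) : Int) := by omega
  have hkps : r.toNat ≤ ps.length := by omega
  have hsdw : PySem.List.pyGetD (pvSuffix (fun p => p.1 * p.2) ps) r 0
      = ((ps.drop r.toNat).map (fun p => p.1 * p.2)).sum := by
    rw [hrk, PySem.List.pyGetD_natCast, Int.toNat_natCast,
      pvSuffix_getD _ ps r.toNat hkps]
  have hsw : PySem.List.pyGetD (pvSuffix (fun p => p.2) ps) r 0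
      = ((ps.drop r.toNat).map (fun p => p.2)).sum := by
    rw [hrk, PySem.List.pyGetD_natCast, Int.toNat_natCast,
      pvSuffix_getD _ ps r.toNat hkps]
  have hsplit := sum_ite_split level ps r.toNat hkps
    (by
      intro j hj hjk
      have h1 := hlowD j (by omega)
      rw [List.getD_eq_getElem?_getD, List.getElem?_eq_getElem (by omega : j < ds.length)] at h1
      simpa [hds, List.getElem_map] using h1)
    (by
      intro j hj hjk
      have h1 := hhighD j (by omega) (by rw [hdlen]; omega)
      rw [List.getD_eq_getElem?_getD, List.getElem?_eq_getElem (by omega : j < ds.length)] at h1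
      simpa [hds, List.getElem_map] using h1)
  have hperm : ((pvPairs diffs times).map (fun p => if level < p.1 then (p.1 - level) * p.2 else 0)).sum
      = (ps.map (fun p => if level < p.1 then (p.1 - level) * p.2 else 0)).sum :=
    (((PySem.List.sorted_perm (pvPairs diffs times) (fun p => p.1) false).map _).sum_eq).symm
  rw [puzzle_eq level diffs times limit hlen]
  dsimp only [pvOk]
  rw [← hr, hsdw, hsw, PySem.List.slice_to_natCast, hperm, hsplit]
  congr 1
  ring_nf

-- ===== VERDICT (by name: the statement is the Claim_ definition above) =====
theorem solution_spec : Claim_equal_solution := by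
  intro diffs times limit _hdom hpre
  show solution diffs times limit = solution_alt diffs times limit
  unfold solution solution_alt
  exact congrFun (congrArg (fun c => pvSearch c 1 ((PySem.List.max? diffs (fun y => y)).getD 0))
    (funext fun mid => (checks_eq diffs times limit hpre.2 mid).symm)) 1
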